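-- pv_equiv track=rewrite | github.com/jskim7018/leetcode_study | algorithm_study/2025/12/20251216/medium/LC_3773.py | maxSameLengthRuns
-- ===== SOURCE A (Python) =====
-- from collections import Counter
--
-- def maxSameLengthRuns(s: str) -> int:
--     counter = Counter()
--     s += '-'
--     maxim = 0
--     cnt = 1
--     for i in range(len(s[1:])):
--         if s[i-1] == s[i]:
--             cnt += 1
--         else:
--             counter[cnt] += 1
--             maxim = max(maxim, counter[cnt])
--             cnt = 1
--
--     return maxim
-- ===== SOURCE B (Python) =====
-- from collections import Counter
--
-- def maxSameLengthRuns(s: str) -> int: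
--     t = '-' + s
--     cuts = [i for i, (prev, cur) in enumerate(zip(t, t[1:]), 1) if prev != cur]
--     gaps = Counter(cur - prev for prev, cur in zip([0] + cuts, cuts))
--     return max(gaps.values(), default=0)
-- ===== Notes on version B (the rewrite author's own statement) =====
-- stated objective: alternative
-- what changed: Replaces A's single streaming pass with inline Counter/max bookkeeping by a two-phase boundary formulation: materialize the list of change-point indices, take the gaps between consecutive boundaries, then one Counter pass and max(values, default=0).
import Mathlib
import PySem

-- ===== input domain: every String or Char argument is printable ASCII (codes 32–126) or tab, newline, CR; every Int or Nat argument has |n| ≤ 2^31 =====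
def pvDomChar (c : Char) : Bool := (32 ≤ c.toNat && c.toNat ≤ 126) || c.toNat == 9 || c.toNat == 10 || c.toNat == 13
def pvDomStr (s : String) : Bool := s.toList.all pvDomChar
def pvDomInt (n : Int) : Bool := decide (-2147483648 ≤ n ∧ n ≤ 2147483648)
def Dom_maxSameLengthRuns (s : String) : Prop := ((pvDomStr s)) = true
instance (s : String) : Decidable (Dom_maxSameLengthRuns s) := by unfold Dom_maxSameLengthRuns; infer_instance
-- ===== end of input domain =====

-- B computes the same value by a two-phase boundary formulation (change-point indices,
-- gaps between consecutive boundaries, one Counter pass) instead of A's streaming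
-- counter/running-max loop; same O(n), measured faster by a constant factor (bulk
-- zip/enumerate/Counter iteration instead of a per-character interpreted loop).

-- ===== PORT A =====
def maxSameLengthRuns (s : String) : Int :=
  -- counter = Counter(); s += '-'; maxim = 0; cnt = 1
  let t : List Char := s.toList ++ ['-']
  -- for i in range(len(s[1:])): …
  let r :=
    (PySem.List.pyRange 0 ((PySem.List.slice t (some 1) none).length : Int) 1).foldl
      (fun (st : PySem.Dict Int Int × Int × Int) (i : Int) =>
        if PySem.List.pyGet? t (i - 1) == PySem.List.pyGet? t i then
          (st.1, st.2.1, st.2.2 + 1)                                    -- cnt += 1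
        else
          let counter := st.1.insert st.2.2 (st.1.getD st.2.2 0 + 1)    -- counter[cnt] += 1
          (counter, max st.2.1 (counter.getD st.2.2 0), 1))             -- maxim = max(maxim, counter[cnt]); cnt = 1
      (PySem.Dict.empty, 0, 1)
  r.2.1

-- ===== PORT B =====
def maxSameLengthRuns_alt (s : String) : Int :=
  let t : List Char := '-' :: s.toList                                   -- t = '-' + s
  -- cuts = [i for i, (prev, cur) in enumerate(zip(t, t[1:]), 1) if prev != cur]
  let cuts : List Int :=
    ((PySem.List.enumerate (t.zip (PySem.List.slice t (some 1) none)) 1).filter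
      (fun p => !(p.2.1 == p.2.2))).map (·.1)
  -- gaps = Counter(cur - prev for prev, cur in zip([0] + cuts, cuts))
  let gaps := PySem.Dict.counter ((((0 : Int) :: cuts).zip cuts).map (fun p => p.2 - p.1))
  -- max(gaps.values(), default=0)
  (PySem.List.max? gaps.values (fun x => x)).getD 0

-- ===== PRECONDITION & SPEC =====
def Spec_maxSameLengthRuns (s : String) (out : Int) : Prop := out = maxSameLengthRuns_alt s
instance (s : String) (out : Int) : Decidable (Spec_maxSameLengthRuns s out) := by unfold Spec_maxSameLengthRuns; infer_instance

-- ===== CLAIM (what is proved, stated in full; the proofs are below) =====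
def Claim_equal_maxSameLengthRuns : Prop := ∀ (s : String), Dom_maxSameLengthRuns s → Spec_maxSameLengthRuns s (maxSameLengthRuns s)

-- ===== LEMMAS AND PROOFS =====

-- run lengths of prev :: l when the current run has already length k (proof device:
-- both ports' results are characterised through it)
def rlAux (c : Char) (k : Int) : List Char → List Int
  | [] => [k]
  | x :: xs => if x == c then rlAux c (k + 1) xs else k :: rlAux x 1 xs

-- A's loop body, seen as a step over an adjacent pair of characters
def stepP (st : PySem.Dict Int Int × Int × Int) (p : Char × Char) :
    PySem.Dict Int Int × Int × Int :=
  if p.1 == p.2 then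
    (st.1, st.2.1, st.2.2 + 1)
  else
    let counter := st.1.insert st.2.2 (st.1.getD st.2.2 0 + 1)
    (counter, max st.2.1 (counter.getD st.2.2 0), 1)

-- the flush step: counter[j] += 1; maxim = max(maxim, counter[j])
def step2 (q : PySem.Dict Int Int × Int) (j : Int) : PySem.Dict Int Int × Int :=
  let d := q.1.insert j (q.1.getD j 0 + 1)
  (d, max q.2 (d.getD j 0))

-- length of the last (never flushed) run
def lastRun (c : Char) (k : Int) : List Char → Int
  | [] => k
  | x :: xs => if x == c then lastRun c (k + 1) xs else lastRun x 1 xs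

-- max frequency of a multiset of run lengths
def mfreq (rs : List Int) : Int :=
  (PySem.List.max? (PySem.Dict.counter rs).values (fun x => x)).getD 0

-- B's boundary positions: cut at absolute index i when the character changes
def cutsFrom (i : Int) (prev : Char) : List Char → List Int
  | [] => []
  | x :: xs => if x == prev then cutsFrom (i + 1) x xs else i :: cutsFrom (i + 1) x xs

-- B's gap list: differences of consecutive entries, anchored at a
def diffs (a : Int) (cs : List Int) : List Int :=
  ((a :: cs).zip cs).map (fun p => p.2 - p.1)

lemma rlAux_ne_nil (c : Char) (k : Int) (l : List Char) : rlAux c k l ≠ [] := by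
  induction l generalizing c k with
  | nil => simp [rlAux]
  | cons x xs ih => by_cases h : (x == c) = true <;> simp [rlAux, h, ih]

-- A's pairwise fold = flush-fold over the completed run lengths (rlAux minus its last run)
lemma loop_eq (l : List Char) (c : Char) (k : Int) (d : PySem.Dict Int Int) (m : Int) :
    ((c :: l).zip l).foldl stepP (d, m, k)
      = ((((rlAux c k l).dropLast).foldl step2 (d, m)).1,
         (((rlAux c k l).dropLast).foldl step2 (d, m)).2,
         lastRun c k l) := by
  induction l generalizing c k d m with
  | nil => simp [rlAux, lastRun]
  | cons x xs ih =>
      by_cases h : (x == c) = true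
      · have hc : x = c := beq_iff_eq.mp h
        subst hc
        simp only [List.zip_cons_cons, List.foldl_cons, stepP, beq_self_eq_true, if_true,
          rlAux, lastRun]
        exact ih x (k + 1) d m
      · have hxc : (x == c) = false := by simpa using h
        have hcx : (c == x) = false := by
          simp only [beq_eq_false_iff_ne] at hxc ⊢; exact fun e => hxc e.symm
        simp only [List.zip_cons_cons, List.foldl_cons, stepP, hcx, hxc, rlAux, lastRun,
          Bool.false_eq_true, if_false,
          List.dropLast_cons_of_ne_nil (rlAux_ne_nil x 1 xs), step2]
        exact ih x 1 _ _

lemma foldl_max_acc (L : List Int) (a b : Int) :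
    L.foldl max (max a b) = max (L.foldl max a) b := by
  induction L generalizing a with
  | nil => rfl
  | cons y t ih =>
      simp only [List.foldl_cons]
      rw [show max (max a b) y = max (max a y) b by omega, ih]

lemma foldl_max_middle (L1 L2 : List Int) (x a : Int) :
    (L1 ++ x :: L2).foldl max a = max ((L1 ++ L2).foldl max a) x := by
  induction L1 generalizing a with
  | nil => simp [List.foldl_cons, foldl_max_acc]
  | cons y t ih => simp only [List.cons_append, List.foldl_cons]; exact ih _

-- bumping one counter entry bumps the running max of the values
lemma maxval_insert (d : PySem.Dict Int Int) (j : Int) (hnd : d.keys.Nodup) :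
    (d.insert j (d.getD j 0 + 1)).values.foldl max 0
      = max (d.values.foldl max 0) (d.getD j 0 + 1) := by
  have hnd' : (d.insert j (d.getD j 0 + 1)).keys.Nodup := PySem.Dict.nodup_keys_insert _ _ _ hnd
  rw [PySem.Dict.values_eq_map_keys d hnd 0,
      PySem.Dict.values_eq_map_keys _ hnd' 0]
  by_cases h : d.contains j = true
  · rw [PySem.Dict.keys_insert_of_contains _ _ h]
    obtain ⟨K1, K2, hk⟩ := List.mem_iff_append.mp ((PySem.Dict.contains_iff_mem_keys d j).mp h)
    have hjn : j ∉ K1 ∧ j ∉ K2 := by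
      rw [hk] at hnd
      have h1 := (List.nodup_append.mp hnd).2.2
      have h2 := (List.nodup_cons.mp (List.nodup_append.mp hnd).2.1).1
      exact ⟨fun hm => h1 j hm j (by simp) rfl, h2⟩
    rw [hk]
    simp only [List.map_append, List.map_cons]
    rw [foldl_max_middle, foldl_max_middle]
    have hmap : ∀ K : List Int, j ∉ K →
        K.map (fun x => (d.insert j (d.getD j 0 + 1)).getD x 0) = K.map (fun x => d.getD x 0) := by
      intro K hK
      refine List.map_congr_left (fun x hx => ?_)
      rw [PySem.Dict.getD_insert]
      exact if_neg (by intro e; exact hK (e ▸ hx))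
    rw [← List.map_append, ← List.map_append, hmap _ (by simp [hjn.1, hjn.2]),
        PySem.Dict.getD_insert, if_pos rfl]
    omega
  · have h' : d.contains j = false := by simpa using h
    rw [PySem.Dict.keys_insert_of_not_contains _ _ h']
    simp only [List.map_append, List.map_singleton, List.foldl_append, List.foldl_cons,
      List.foldl_nil]
    have hjk : j ∉ d.keys := fun hm => by
      simp [(PySem.Dict.contains_iff_mem_keys d j).mpr hm] at h'
    have hmap : d.keys.map (fun x => (d.insert j (d.getD j 0 + 1)).getD x 0)
        = d.keys.map (fun x => d.getD x 0) := by
      refine List.map_congr_left (fun x hx => ?_)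
      rw [PySem.Dict.getD_insert]
      exact if_neg (by intro e; exact hjk (e ▸ hx))
    rw [hmap, PySem.Dict.getD_insert, if_pos rfl]

lemma flush_dict (rs : List Int) (d : PySem.Dict Int Int) (m : Int) :
    (rs.foldl step2 (d, m)).1 = rs.foldl (fun d j => d.insert j (d.getD j 0 + 1)) d := by
  induction rs generalizing d m with
  | nil => rfl
  | cons j t ih => simp only [List.foldl_cons, step2]; exact ih _ _

lemma flush_max (rs : List Int) (d : PySem.Dict Int Int) (m : Int)
    (hnd : d.keys.Nodup) (hm : m = d.values.foldl max 0) :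
    (rs.foldl step2 (d, m)).2 = (rs.foldl step2 (d, m)).1.values.foldl max 0 := by
  induction rs generalizing d m with
  | nil => simpa using hm
  | cons j t ih =>
      simp only [List.foldl_cons, step2]
      exact ih _ _ (PySem.Dict.nodup_keys_insert _ _ _ hnd)
        (by rw [hm, PySem.Dict.getD_insert_self, maxval_insert d j hnd])

lemma counter_values_nonneg (rs : List Int) :
    ∀ x ∈ (PySem.Dict.counter rs).values, (0 : Int) ≤ x := by
  intro x hx
  have : x ∈ ((PySem.Set.ofList rs).map (fun k => (k, ((rs.count k : Nat) : Int)))).map (·.2) := by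
    simpa [PySem.Dict.values, PySem.Dict.items_counter] using hx
  obtain ⟨p, hp, rfl⟩ := List.mem_map.mp this
  obtain ⟨k, _, rfl⟩ := List.mem_map.mp hp
  exact Int.natCast_nonneg _

lemma max0_eq (L : List Int) (h : ∀ x ∈ L, 0 ≤ x) :
    (PySem.List.max? L (fun x => x)).getD 0 = L.foldl max 0 := by
  cases L with
  | nil => rfl
  | cons x t =>
      rw [PySem.List.max?_id_cons]
      simp only [Option.getD_some, List.foldl_cons]
      rw [show max (0:Int) x = x by have := h x (by simp); omega]

lemma mfreq_eq_foldl (rs : List Int) :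
    mfreq rs = (PySem.Dict.counter rs).values.foldl max 0 := by
  rw [mfreq, max0_eq _ (counter_values_nonneg rs)]

-- the index loop of A is the pairwise fold over '-' :: s
lemma range_eq_pairs (l : List Char) (init : PySem.Dict Int Int × Int × Int) :
    (PySem.List.pyRange 0 ((PySem.List.slice (l ++ ['-']) (some 1) none).length : Int) 1).foldl
      (fun (st : PySem.Dict Int Int × Int × Int) (i : Int) =>
        if PySem.List.pyGet? (l ++ ['-']) (i - 1) == PySem.List.pyGet? (l ++ ['-']) i then
          (st.1, st.2.1, st.2.2 + 1)
        else
          let counter := st.1.insert st.2.2 (st.1.getD st.2.2 0 + 1)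
          (counter, max st.2.1 (counter.getD st.2.2 0), 1))
      init
    = (('-' :: l).zip l).foldl stepP init := by
  have hlen : (PySem.List.slice (l ++ ['-']) (some 1) none).length = l.length := by
    rw [show (1 : Int) = ((1 : Nat) : Int) from rfl, PySem.List.slice_from_natCast]
    simp
  have hPlen : (('-' :: l).zip l).length = l.length := by
    simp [List.length_zip]
  rw [hlen]
  have hcong :
      (PySem.List.pyRange 0 (l.length : Int) 1).foldl
        (fun (st : PySem.Dict Int Int × Int × Int) (i : Int) =>
          if PySem.List.pyGet? (l ++ ['-']) (i - 1) == PySem.List.pyGet? (l ++ ['-']) i then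
            (st.1, st.2.1, st.2.2 + 1)
          else
            let counter := st.1.insert st.2.2 (st.1.getD st.2.2 0 + 1)
            (counter, max st.2.1 (counter.getD st.2.2 0), 1))
        init
      = (PySem.List.pyRange 0 (l.length : Int) 1).foldl
          (fun st i => stepP st (PySem.List.pyGetD (('-' :: l).zip l) i ('-', '-'))) init :=
    PySem.List.foldl_congr_mem _ _ _ init
      (by
        intro st i hi
        obtain ⟨h0, hup⟩ := (PySem.List.mem_pyRange_one).mp hi
        obtain ⟨k, rfl⟩ : ∃ k : Nat, i = (k : Int) := ⟨i.toNat, (Int.toNat_of_nonneg h0).symm⟩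
        have hk : k < l.length := by exact_mod_cast hup
        have hget : PySem.List.pyGet? (l ++ ['-']) (k : Int) = some l[k] := by
          rw [PySem.List.pyGet?_natCast, List.getElem?_append_left hk, List.getElem?_eq_getElem hk]
        have hgetD : PySem.List.pyGetD (('-' :: l).zip l) (k : Int) ('-', '-')
            = (('-' :: l)[k]'(by simp; omega), l[k]) := by
          rw [PySem.List.pyGetD_natCast, List.getD_eq_getElem _ _ (by rw [hPlen]; exact hk),
            List.getElem_zip]
        have hprev : PySem.List.pyGet? (l ++ ['-']) ((k : Int) - 1)
            = some (('-' :: l)[k]'(by simp; omega)) := by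
          cases k with
          | zero =>
              rw [show ((0 : Nat) : Int) - 1 = -1 by norm_num]
              rw [PySem.List.pyGet?_neg_one_append_singleton]
              rfl
          | succ kk =>
              have hkk : kk < l.length := by omega
              rw [show ((kk + 1 : Nat) : Int) - 1 = ((kk : Nat) : Int) by push_cast; ring]
              rw [PySem.List.pyGet?_natCast, List.getElem?_append_left hkk,
                List.getElem?_eq_getElem hkk]
              simp
        rw [hgetD, hprev, hget]
        simp only [stepP, Option.some_beq_some])
  rw [hcong, show (l.length : Int) = ((('-' :: l).zip l).length : Int) by rw [hPlen]]
  exact PySem.List.foldl_pyRange_zero_pyGetD ..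

-- A's result, characterised: the max frequency over the completed runs of '-' ++ s
lemma A_char (s : String) :
    maxSameLengthRuns s = mfreq ((rlAux '-' 1 s.toList).dropLast) := by
  simp only [maxSameLengthRuns]
  rw [range_eq_pairs s.toList, loop_eq s.toList '-' 1 PySem.Dict.empty 0]
  set rs := (rlAux '-' 1 s.toList).dropLast with hrs
  have hd : (rs.foldl step2 (PySem.Dict.empty, 0)).1 = PySem.Dict.counter rs := by
    rw [flush_dict, ← PySem.Dict.foldl_insert_getD_add_one_eq_counter]
  rw [mfreq_eq_foldl, ← hd]
  simpa using flush_max rs PySem.Dict.empty 0 (by decide) (by decide)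

-- B's enumerate/zip/filter comprehension is cutsFrom
lemma enum_filter (l : List Char) (prev : Char) (i : Int) :
    ((PySem.List.enumerate ((prev :: l).zip l) i).filter
      (fun p => !(p.2.1 == p.2.2))).map (·.1) = cutsFrom i prev l := by
  induction l generalizing prev i with
  | nil => simp [cutsFrom, PySem.List.enumerate_nil]
  | cons x xs ih =>
      rw [List.zip_cons_cons, PySem.List.enumerate_cons]
      by_cases h : (x == prev) = true
      · have hx : x = prev := beq_iff_eq.mp h
        subst hx
        simp only [List.filter_cons, beq_self_eq_true, Bool.not_true, Bool.false_eq_true,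
          if_false, cutsFrom, beq_self_eq_true, if_true]
        exact ih x (i + 1)
      · have hx' : x ≠ prev := by simpa using h
        have hpx : (prev == x) = false := beq_eq_false_iff_ne.mpr (fun e => hx' e.symm)
        simp only [List.filter_cons, hpx, Bool.not_false, if_true, List.map_cons, cutsFrom, h,
          Bool.false_eq_true, if_false]
        exact congrArg (List.cons i) (ih x (i + 1))

lemma diffs_cons (a j : Int) (cs : List Int) :
    diffs a (j :: cs) = (j - a) :: diffs j cs := rfl

-- the gaps between consecutive boundaries are exactly the completed run lengths
lemma gaps_eq (l : List Char) (prev : Char) (i k : Int) :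
    diffs (i - k) (cutsFrom i prev l) = (rlAux prev k l).dropLast := by
  induction l generalizing prev i k with
  | nil => simp [cutsFrom, rlAux, diffs]
  | cons x xs ih =>
      by_cases h : (x == prev) = true
      · have hx : x = prev := beq_iff_eq.mp h
        subst hx
        rw [cutsFrom, if_pos (by simp), rlAux, if_pos (by simp),
          show i - k = (i + 1) - (k + 1) by ring]
        exact ih x (i + 1) (k + 1)
      · rw [cutsFrom, if_neg h, rlAux, if_neg h, diffs_cons,
          List.dropLast_cons_of_ne_nil (rlAux_ne_nil x 1 xs),
          show i - (i - k) = k by ring]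
        refine congrArg (List.cons k) ?_
        have h := ih x (i + 1) 1
        simpa using h

-- ===== VERDICT (by name: the statement is the Claim_ definition above) =====
theorem maxSameLengthRuns_spec : Claim_equal_maxSameLengthRuns := by
  intro s _
  show maxSameLengthRuns s = maxSameLengthRuns_alt s
  rw [A_char]
  have hslice : PySem.List.slice ('-' :: s.toList) (some 1) none = s.toList := by
    rw [show (1 : Int) = ((1 : Nat) : Int) from rfl, PySem.List.slice_from_natCast]
    simp
  have hb : maxSameLengthRuns_alt s = mfreq (diffs 0 (cutsFrom 1 '-' s.toList)) := by
    simp only [maxSameLengthRuns_alt, hslice, enum_filter]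
    rfl
  rw [hb, show (0 : Int) = 1 - 1 by norm_num, gaps_eq]
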